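-- pv_equiv track=rewrite | github.com/elbarakamohamedgithub/Python | recursividad/ejerecur.py | deMayuAMinu
-- ===== SOURCE A (Python) =====
-- def deMayuAMinu(frase, resultado, i):
--     vocales = "aeiou"
--     if len(frase) == i:
--         return resultado
--     else:
--         if frase[i] in vocales:
--             resultado +=  frase[i].upper()
--             return deMayuAMinu(frase, resultado, i+1)
--         else:
--             resultado +=  frase[i].lower()
--             return deMayuAMinu(frase, resultado,i+1)
-- ===== SOURCE B (Python) =====
-- def deMayuAMinu(frase, resultado, i):
--     vocales = "aeiou"
--     return resultado + ''.join(c.upper() if c in vocales else c.lower() for c in frase[i:])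
-- ===== Notes on version B (the rewrite author's own statement) =====
-- stated objective: simpler
-- what changed: Replaced the tail recursion that rebuilds the string one character per call with a single slice frase[i:] mapped through a conditional upper/lower and joined onto resultado.
-- outside the precondition, e.g. on deMayuAMinu('abc', '', -1): A returns 'cAbc', B returns 'c'; on deMayuAMinu('ab', 'x', 5): A raises IndexError, B returns 'x'
import Mathlib
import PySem

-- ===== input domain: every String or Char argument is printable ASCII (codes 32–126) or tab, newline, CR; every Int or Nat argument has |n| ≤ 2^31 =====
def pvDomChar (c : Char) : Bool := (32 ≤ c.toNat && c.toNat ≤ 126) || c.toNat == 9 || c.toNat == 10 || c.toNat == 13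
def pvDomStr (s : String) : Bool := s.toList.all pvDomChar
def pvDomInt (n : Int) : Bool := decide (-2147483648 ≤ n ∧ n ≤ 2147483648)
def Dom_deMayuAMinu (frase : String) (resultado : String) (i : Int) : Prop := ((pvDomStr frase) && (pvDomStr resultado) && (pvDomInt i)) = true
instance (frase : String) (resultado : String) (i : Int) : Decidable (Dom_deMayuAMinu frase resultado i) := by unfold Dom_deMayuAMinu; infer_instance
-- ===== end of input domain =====

-- B replaces A's per-character tail recursion by one slice + map + join (objective: simpler).

-- ===== PORT A =====
-- literal transliteration of A's recursion, on the character lists of the strings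
def deMayuAMinuAux (frase : List Char) (resultado : List Char) (i : Int) : List Char :=
  if (frase.length : Int) = i then resultado
  else
    match h : PySem.List.pyGet? frase i with
    | none => resultado   -- Python raises IndexError here (frase[i]); excluded by Pre_
    | some c =>
      if c ∈ "aeiou".toList then
        deMayuAMinuAux frase (resultado ++ [PySem.Chars.upperChar c]) (i + 1)
      else
        deMayuAMinuAux frase (resultado ++ [PySem.Chars.lowerChar c]) (i + 1)
termination_by (frase.length - i).toNat
decreasing_by
  all_goals
    have hr : PySem.Raise.InRange frase.length i := by
      by_contra hc
      rw [← PySem.List.pyGet?_eq_none_iff (xs := frase)] at hc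
      simp [hc] at h
    unfold PySem.Raise.InRange at hr
    omega

def deMayuAMinu (frase : String) (resultado : String) (i : Int) : String :=
  String.ofList (deMayuAMinuAux frase.toList resultado.toList i)

-- ===== PORT B =====
def deMayuAMinu_alt (frase : String) (resultado : String) (i : Int) : String :=
  String.ofList (resultado.toList ++
    (PySem.List.slice frase.toList (some i) none).map
      (fun c => if c ∈ "aeiou".toList then PySem.Chars.upperChar c else PySem.Chars.lowerChar c))

-- ===== PRECONDITION & SPEC =====
-- Pre_ excludes i > len(frase) and i < -len(frase), where A raises IndexError, and negative
-- in-range i, where A's negative-index wraparound processes frase[i:] and then the whole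
-- string again — an artefact of the recursion; B returns the transformed slice there.
def Pre_deMayuAMinu (frase : String) (resultado : String) (i : Int) : Prop :=
  0 ≤ i ∧ i ≤ (frase.toList.length : Int)
instance (frase : String) (resultado : String) (i : Int) : Decidable (Pre_deMayuAMinu frase resultado i) := by unfold Pre_deMayuAMinu; infer_instance

def pvWitness_deMayuAMinu : String × String × Int := ("ab", "x", 0)

def Spec_deMayuAMinu (frase : String) (resultado : String) (i : Int) (out : String) : Prop := out = deMayuAMinu_alt frase resultado i
instance (frase : String) (resultado : String) (i : Int) (out : String) : Decidable (Spec_deMayuAMinu frase resultado i out) := by unfold Spec_deMayuAMinu; infer_instance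

-- ===== CLAIM (what is proved, stated in full; the proofs are below) =====
def Claim_equal_deMayuAMinu : Prop := ∀ (frase : String) (resultado : String) (i : Int), Dom_deMayuAMinu frase resultado i → Pre_deMayuAMinu frase resultado i → Spec_deMayuAMinu frase resultado i (deMayuAMinu frase resultado i)


-- ===== LEMMAS AND PROOFS =====

-- the per-character transform B uses
def pvF (c : Char) : Char :=
  if c ∈ "aeiou".toList then PySem.Chars.upperChar c else PySem.Chars.lowerChar c

theorem aux_eq (frase : List Char) :
    ∀ (n : Nat) (res : List Char) (i : Int), 0 ≤ i → i.toNat + n = frase.length →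
      deMayuAMinuAux frase res i = res ++ (frase.drop i.toNat).map pvF := by
  intro n
  induction n with
  | zero =>
    intro res i h0 hn
    rw [deMayuAMinuAux]
    have hi : (frase.length : Int) = i := by omega
    simp [hi, List.drop_of_length_le (by omega : frase.length ≤ i.toNat)]
  | succ n ih =>
    intro res i h0 hn
    have hlt : i.toNat < frase.length := by omega
    have hget : PySem.List.pyGet? frase i = some frase[i.toNat] :=
      PySem.List.pyGet?_eq_some_getElem frase h0 (by omega)
    rw [deMayuAMinuAux]
    have hne : ¬ ((frase.length : Int) = i) := by omega
    simp only [hne, if_false]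
    have hstep : ∀ r : List Char,
        deMayuAMinuAux frase r (i + 1) = r ++ (frase.drop (i.toNat + 1)).map pvF := by
      intro r
      have := ih r (i + 1) (by omega) (by omega)
      rwa [show (i + 1).toNat = i.toNat + 1 by omega] at this
    have hdrop : frase.drop i.toNat = frase[i.toNat] :: frase.drop (i.toNat + 1) :=
      List.drop_eq_getElem_cons hlt
    split
    next h' =>
      rw [hget] at h'; cases h'
    next c h' =>
      rw [hget] at h'
      injection h' with hc
      subst hc
      by_cases hv : frase[i.toNat] ∈ "aeiou".toList
      · have hf : pvF frase[i.toNat] = PySem.Chars.upperChar frase[i.toNat] := by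
          unfold pvF; rw [if_pos hv]
        rw [if_pos hv, hstep, hdrop, List.map_cons, hf]
        simp
      · have hf : pvF frase[i.toNat] = PySem.Chars.lowerChar frase[i.toNat] := by
          unfold pvF; rw [if_neg hv]
        rw [if_neg hv, hstep, hdrop, List.map_cons, hf]
        simp

-- ===== VERDICT (by name: the statement is the Claim_ definition above) =====
theorem deMayuAMinu_spec : Claim_equal_deMayuAMinu := by
  intro frase resultado i _ ⟨h0, h1⟩
  unfold Spec_deMayuAMinu deMayuAMinu deMayuAMinu_alt
  rw [PySem.List.slice_from _ h0,
    aux_eq frase.toList (frase.toList.length - i.toNat) resultado.toList i h0 (by omega)]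
  rfl
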